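-- pv_equiv track=rewrite | github.com/spacetelescope/drizzlepac | tests/hap/svm_test_utils.py | _collect_wildcards
-- ===== SOURCE A (Python) =====
-- from typing import Iterable, Sequence, Set
--
-- def _collect_wildcards(filenames: Iterable[str], suffixes: Sequence[str]) -> dict[str, str]:
--     wildcards: dict[str, str] = {}
--     for name in filenames:
--         lower_name = name.lower()
--         for suffix in suffixes:
--             suffix_lower = suffix.lower()
--             if lower_name.endswith(f"{suffix_lower}.fits") and suffix not in wildcards:
--                 wildcards[suffix] = name[:6] + "*"
--     return wildcards
-- ===== SOURCE B (Python) =====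
-- def _collect_wildcards(filenames, suffixes):
--     # Worklist: deduplicate suffixes once, precompute each lowered tail once,
--     # then scan only the still-unmatched suffixes per filename, stopping early
--     # when none remain.
--     pending = []
--     seen = set()
--     for suffix in suffixes:
--         if suffix not in seen:
--             seen.add(suffix)
--             pending.append((suffix, suffix.lower() + ".fits"))
--     wildcards = {}
--     for name in filenames:
--         if not pending:
--             break
--         lower_name = name.lower()
--         prefix = name[:6] + "*"
--         still = []
--         for suffix, tail in pending:
--             if lower_name.endswith(tail):
--                 wildcards[suffix] = prefix
--             else:
--                 still.append((suffix, tail))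
--         pending = still
--     return wildcards
-- ===== Notes on version B (the rewrite author's own statement) =====
-- stated objective: faster
-- what changed: B replaces A's per-filename rescan of every suffix (re-lowering each suffix and re-testing dict membership on every iteration) by a shrinking worklist of still-unmatched (suffix, lowered tail) pairs built once up front (deduplicated), inserting unconditionally and stopping early once the worklist is empty.
import Mathlib
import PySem

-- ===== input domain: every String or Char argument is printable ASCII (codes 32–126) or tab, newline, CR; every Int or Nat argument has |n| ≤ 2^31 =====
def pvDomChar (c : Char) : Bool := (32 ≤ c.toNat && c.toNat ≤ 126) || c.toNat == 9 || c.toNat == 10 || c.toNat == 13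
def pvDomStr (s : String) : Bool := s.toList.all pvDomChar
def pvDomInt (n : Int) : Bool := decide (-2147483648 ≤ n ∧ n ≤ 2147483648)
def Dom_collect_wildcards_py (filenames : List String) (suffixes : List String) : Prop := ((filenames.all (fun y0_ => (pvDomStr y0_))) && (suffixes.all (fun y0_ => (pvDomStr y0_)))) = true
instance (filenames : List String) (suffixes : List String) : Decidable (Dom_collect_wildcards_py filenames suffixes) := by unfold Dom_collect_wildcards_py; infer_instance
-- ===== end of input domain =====

-- B replaces A's full rescan of all suffixes per filename (with a dict-membership
-- guard) by a shrinking worklist of still-unmatched (suffix, lowered tail) pairs,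
-- deduplicated and lowered once up front, with an early stop once it is empty
-- (measurably faster by a constant factor; same worst-case asymptotics).

-- ===== PORT A =====
-- inner loop of A: for suffix in suffixes: if lower_name.endswith(suffix.lower()+".fits") and suffix not in wildcards: wildcards[suffix] = name[:6]+"*"
def pvInnerA (name : String) (suffixes : List String) (w : PySem.Dict String String) : PySem.Dict String String :=
  suffixes.foldl (fun w suffix =>
    if PySem.Chars.endswith (PySem.Chars.lower name.toList)
        (PySem.Chars.lower suffix.toList ++ ".fits".toList)
        && !(PySem.Dict.contains w suffix) then
      PySem.Dict.insert w suffix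
        (String.ofList (PySem.List.slice name.toList none (some 6) ++ "*".toList))
    else w) w

def collect_wildcards_py (filenames : List String) (suffixes : List String) : List (String × String) :=
  (filenames.foldl (fun w name => pvInnerA name suffixes w)
    (PySem.Dict.empty : PySem.Dict String String)).items

-- ===== PORT B =====
-- tail = suffix.lower() + ".fits"
def pvTail (suffix : String) : List Char :=
  PySem.Chars.lower suffix.toList ++ ".fits".toList

-- the first loop of B: deduplicate suffixes (seen-set) and pair each with its tail
def pvPendingInit (suffixes : List String) : PySem.Set String × List (String × List Char) :=
  suffixes.foldl (fun st suffix =>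
    if PySem.Set.contains st.1 suffix then st
    else (PySem.Set.add st.1 suffix, st.2 ++ [(suffix, pvTail suffix)]))
    ((PySem.Set.empty : PySem.Set String), [])

-- body of B's inner loop over the pending worklist; state = (still, wildcards)
def pvStep (lowerName : List Char) (pre : String)
    (st : List (String × List Char) × PySem.Dict String String)
    (p : String × List Char) :
    List (String × List Char) × PySem.Dict String String :=
  if PySem.Chars.endswith lowerName p.2 then (st.1, PySem.Dict.insert st.2 p.1 pre)
  else (st.1 ++ [p], st.2)

def collect_wildcards_py_alt (filenames : List String) (suffixes : List String) : List (String × String) :=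
  (filenames.foldl (fun st name =>
      if st.1 = [] then st   -- 'if not pending: break'
      else
        st.1.foldl
          (pvStep (PySem.Chars.lower name.toList)
            (String.ofList (PySem.List.slice name.toList none (some 6) ++ "*".toList)))
          ([], st.2))
    ((pvPendingInit suffixes).2, (PySem.Dict.empty : PySem.Dict String String))).2.items

-- ===== PRECONDITION & SPEC =====
def Spec_collect_wildcards_py (filenames : List String) (suffixes : List String) (out : List (String × String)) : Prop := out = collect_wildcards_py_alt filenames suffixes
instance (filenames : List String) (suffixes : List String) (out : List (String × String)) : Decidable (Spec_collect_wildcards_py filenames suffixes out) := by unfold Spec_collect_wildcards_py; infer_instance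

-- ===== CLAIM (what is proved, stated in full; the proofs are below) =====
def Claim_equal_collect_wildcards_py : Prop := ∀ (filenames : List String) (suffixes : List String), Dom_collect_wildcards_py filenames suffixes → Spec_collect_wildcards_py filenames suffixes (collect_wildcards_py filenames suffixes)

-- ===== LEMMAS AND PROOFS =====


def pvTag (s : String) : String × List Char := (s, pvTail s)

theorem pendingInit_aux (xs : List String) :
    ∀ seen : PySem.Set String,
    xs.foldl (fun st suffix =>
      if PySem.Set.contains st.1 suffix then st
      else (PySem.Set.add st.1 suffix, st.2 ++ [(suffix, pvTail suffix)]))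
      (seen, seen.map pvTag) =
    (xs.foldl PySem.Set.add seen, (xs.foldl PySem.Set.add seen).map pvTag) := by
  induction xs with
  | nil => intro seen; rfl
  | cons x xs ih =>
    intro seen
    simp only [List.foldl_cons]
    by_cases h : PySem.Set.contains seen x
    · have h' : x ∈ seen := by simpa using h
      have ha : PySem.Set.add seen x = seen := by simp [PySem.Set.add, h']
      rw [ha, if_pos h]
      exact ih seen
    · have h' : x ∉ seen := by simpa using h
      have ha : PySem.Set.add seen x = seen ++ [x] := by simp [PySem.Set.add, h']
      rw [if_neg h, ha]
      have := ih (seen ++ [x])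
      simpa only [List.map_append, List.map_cons, List.map_nil, pvTag] using this


theorem pendingInit_eq (suffixes : List String) :
    pvPendingInit suffixes =
      (PySem.Set.ofList suffixes, (PySem.Set.ofList suffixes).map pvTag) := by
  have := pendingInit_aux suffixes PySem.Set.empty
  simpa [pvPendingInit, PySem.Set.ofList_eq_foldl, PySem.Set.empty] using this


theorem stepB_split (lowerName : List Char) (pre : String)
    (pending : List (String × List Char)) :
    ∀ (acc : List (String × List Char)) (w : PySem.Dict String String),
    pending.foldl (pvStep lowerName pre) (acc, w) =
      (acc ++ pending.filter (fun p => !PySem.Chars.endswith lowerName p.2),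
       (pending.filter (fun p => PySem.Chars.endswith lowerName p.2)).foldl
         (fun w p => PySem.Dict.insert w p.1 pre) w) := by
  induction pending with
  | nil => intro acc w; simp
  | cons p ps ih =>
    intro acc w
    simp only [List.foldl_cons, List.filter_cons]
    by_cases h : PySem.Chars.endswith lowerName p.2
    · simp only [pvStep, h, if_pos, Bool.not_true, List.foldl_cons]
      rw [ih]
      simp
    · simp only [pvStep, h, if_neg, Bool.not_false, Bool.false_eq_true, not_false_iff]
      rw [ih]
      simp

theorem contains_insert_fold (pre : String) (K : List String) :
    ∀ (w : PySem.Dict String String) (s : String),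
    PySem.Dict.contains (K.foldl (fun w s => PySem.Dict.insert w s pre) w) s =
      (PySem.Dict.contains w s || decide (s ∈ K)) := by
  induction K with
  | nil => intro w s; simp
  | cons k K ih =>
    intro w s
    simp only [List.foldl_cons, ih, PySem.Dict.contains_insert, List.mem_cons]
    by_cases hs : s = k
    · simp [hs]
    · have : (s == k) = false := by simpa using hs
      simp [hs, this]

def pvFoldA (M : String → Bool) (pre : String) (xs : List String)
    (w : PySem.Dict String String) : PySem.Dict String String :=
  xs.foldl (fun w s => if M s && !(PySem.Dict.contains w s)
    then PySem.Dict.insert w s pre else w) w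

def pvDedupFrom (seen : List String) : List String → List String
  | [] => []
  | x :: xs => if x ∈ seen then pvDedupFrom seen xs else x :: pvDedupFrom (seen ++ [x]) xs

theorem foldl_add_eq_dedupFrom (xs : List String) :
    ∀ seen : List String, xs.foldl PySem.Set.add seen = seen ++ pvDedupFrom seen xs := by
  induction xs with
  | nil => intro seen; simp [pvDedupFrom]
  | cons x xs ih =>
    intro seen
    simp only [List.foldl_cons, pvDedupFrom]
    by_cases h : x ∈ seen
    · have ha : PySem.Set.add seen x = seen := by simp [PySem.Set.add, h]
      rw [ha, if_pos h, ih]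
    · have ha : PySem.Set.add seen x = seen ++ [x] := by simp [PySem.Set.add, h]
      rw [ha, if_neg h, ih]
      simp

-- a step of A's inner loop never falsifies "M s is false or s is already a key"
theorem settled_step (M : String → Bool) (pre : String) (w : PySem.Dict String String)
    (x s : String) (h : M s = false ∨ PySem.Dict.contains w s = true) :
    M s = false ∨ PySem.Dict.contains
      (if M x && !(PySem.Dict.contains w x) then PySem.Dict.insert w x pre else w) s = true := by
  rcases h with h | h
  · exact Or.inl h
  · right
    split
    · simp [PySem.Dict.contains_insert, h]
    · exact h

theorem foldA_dedupFrom (M : String → Bool) (pre : String) (xs : List String) :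
    ∀ (seen : List String) (w : PySem.Dict String String),
    (∀ s ∈ seen, M s = false ∨ PySem.Dict.contains w s = true) →
    pvFoldA M pre xs w = pvFoldA M pre (pvDedupFrom seen xs) w := by
  induction xs with
  | nil => intro seen w _; rfl
  | cons x xs ih =>
    intro seen w hset
    simp only [pvFoldA, List.foldl_cons, pvDedupFrom]
    by_cases h : x ∈ seen
    · rw [if_pos h]
      have hx := hset x h
      have hfix : (if M x && !(PySem.Dict.contains w x) then PySem.Dict.insert w x pre else w) = w := by
        rcases hx with hx | hx <;> simp [hx]
      rw [hfix]
      exact ih seen w hset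
    · rw [if_neg h]
      simp only [List.foldl_cons]
      apply ih (seen ++ [x])
      intro s hs
      rcases List.mem_append.mp hs with hs | hs
      · exact settled_step M pre w x s (hset s hs)
      · -- s = x : after the step x is settled
        simp only [List.mem_singleton] at hs
        subst hs
        by_cases hc : M s && !(PySem.Dict.contains w s)
        · right; simp only [hc, if_pos]; simp
        · rw [if_neg hc]
          rcases Bool.and_eq_false_iff.mp (Bool.eq_false_iff.mpr hc) with hc | hc
          · exact Or.inl hc
          · right; simpa using hc

theorem foldA_dedup (M : String → Bool) (pre : String) (xs : List String)
    (w : PySem.Dict String String) :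
    pvFoldA M pre xs w = pvFoldA M pre (PySem.Set.ofList xs) w := by
  rw [foldA_dedupFrom M pre xs [] w (by simp)]
  rw [PySem.Set.ofList_eq_foldl, foldl_add_eq_dedupFrom]
  rfl

theorem foldA_char (M : String → Bool) (pre : String) (xs : List String) :
    ∀ (w : PySem.Dict String String), xs.Nodup →
    pvFoldA M pre xs w =
      (xs.filter (fun s => M s && !(PySem.Dict.contains w s))).foldl
        (fun w s => PySem.Dict.insert w s pre) w := by
  induction xs with
  | nil => intro w _; rfl
  | cons x xs ih =>
    intro w hnd
    rcases List.nodup_cons.mp hnd with ⟨hx, hnd'⟩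
    simp only [pvFoldA, List.foldl_cons, List.filter_cons]
    by_cases hc : M x && !(PySem.Dict.contains w x)
    · rw [if_pos hc, hc]
      have := ih (PySem.Dict.insert w x pre) hnd'
      rw [show pvFoldA M pre xs (PySem.Dict.insert w x pre) =
            List.foldl (fun w s => if M s && !(PySem.Dict.contains w s)
              then PySem.Dict.insert w s pre else w) (PySem.Dict.insert w x pre) xs from rfl] at this
      rw [this]
      have hfe : List.filter (fun s => M s && !(PySem.Dict.contains (PySem.Dict.insert w x pre) s)) xs
          = List.filter (fun s => M s && !(PySem.Dict.contains w s)) xs := by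
        apply List.filter_congr
        intro s hs
        have hne : (s == x) = false := by
          have : s ≠ x := fun e => hx (e ▸ hs)
          simpa using this
        simp [PySem.Dict.contains_insert, hne]
      rw [hfe]
      simp
    · rw [if_neg hc, Bool.eq_false_iff.mpr hc]
      exact ih w hnd'

def pvM (name : String) (s : String) : Bool :=
  PySem.Chars.endswith (PySem.Chars.lower name.toList) (pvTail s)

def pvPre (name : String) : String :=
  String.ofList (PySem.List.slice name.toList none (some 6) ++ "*".toList)

theorem outer_inv (suffixes : List String) (fns : List String) :
    ∀ w : PySem.Dict String String,
    fns.foldl (fun w name => pvFoldA (pvM name) (pvPre name) suffixes w) w =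
      (fns.foldl (fun st name =>
          if st.1 = [] then st
          else st.1.foldl (pvStep (PySem.Chars.lower name.toList) (pvPre name)) ([], st.2))
        (((PySem.Set.ofList suffixes).filter
             (fun s => !(PySem.Dict.contains w s))).map pvTag, w)).2 := by
  induction fns with
  | nil => intro w; rfl
  | cons n fns ih =>
    intro w
    have hnd : (PySem.Set.ofList suffixes).Nodup := PySem.Set.nodup_ofList suffixes
    set ds := PySem.Set.ofList suffixes with hds
    simp only [List.foldl_cons]
    set l := ds.filter (fun s => !(PySem.Dict.contains w s)) with hl
    set K := ds.filter (fun s => pvM n s && !(PySem.Dict.contains w s)) with hK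
    have hA : pvFoldA (pvM n) (pvPre n) suffixes w =
        K.foldl (fun w s => PySem.Dict.insert w s (pvPre n)) w := by
      rw [foldA_dedup, foldA_char _ _ _ _ hnd]
    by_cases hp : l.map pvTag = []
    · have hl0 : l = [] := by simpa using hp
      have hall : ∀ s ∈ ds, PySem.Dict.contains w s = true := by
        intro s hs
        by_contra hc
        have : s ∈ l := by
          rw [hl]; exact List.mem_filter.mpr ⟨hs, by simpa using hc⟩
        simp [hl0] at this
      have hK0 : K = [] := by
        rw [hK]
        apply List.filter_eq_nil_iff.mpr
        intro s hs
        simp [hall s hs]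
      rw [hA, hK0]
      simp only [List.foldl_nil]
      rw [if_pos hp, hp]
      have h2 := ih w
      rw [← hl, hp] at h2
      exact h2
    · rw [if_neg hp]
      rw [stepB_split]
      -- dict component
      have hfm : (l.map pvTag).filter
          (fun p => PySem.Chars.endswith (PySem.Chars.lower n.toList) p.2)
          = (l.filter (fun s => pvM n s)).map pvTag := by
        rw [List.filter_map]
        exact congrArg _ (List.filter_congr (fun s _ => rfl))
      have hfm' : (l.map pvTag).filter
          (fun p => !PySem.Chars.endswith (PySem.Chars.lower n.toList) p.2)
          = (l.filter (fun s => !pvM n s)).map pvTag := by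
        rw [List.filter_map]
        exact congrArg _ (List.filter_congr (fun s _ => rfl))
      have hlK : l.filter (fun s => pvM n s) = K := by
        rw [hl, hK, List.filter_filter]
      have hdict : ((l.map pvTag).filter
            (fun p => PySem.Chars.endswith (PySem.Chars.lower n.toList) p.2)).foldl
            (fun w p => PySem.Dict.insert w p.1 (pvPre n)) w
          = K.foldl (fun w s => PySem.Dict.insert w s (pvPre n)) w := by
        rw [hfm, hlK, List.foldl_map]
        rfl
      set w1 := K.foldl (fun w s => PySem.Dict.insert w s (pvPre n)) w with hw1
      have hpend : l.filter (fun s => !pvM n s)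
          = ds.filter (fun s => !(PySem.Dict.contains w1 s)) := by
        rw [hl, List.filter_filter]
        apply List.filter_congr
        intro s hs
        rw [hw1, contains_insert_fold]
        by_cases hcw : PySem.Dict.contains w s
        · simp [hcw]
        · have hsK : s ∈ K ↔ pvM n s = true := by
            rw [hK]
            constructor
            · intro h; exact (Bool.and_eq_true_iff.mp (List.mem_filter.mp h).2).1
            · intro h
              exact List.mem_filter.mpr ⟨hs, by simp [h, hcw]⟩
          by_cases hm : pvM n s = true
          · simp [hcw, hm, hsK.mpr hm]
          · have : s ∉ K := fun h => hm (hsK.mp h)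
            simp [hcw, hm, this]
      rw [hA, hdict, List.nil_append, hfm', hpend]
      exact ih w1

-- ===== VERDICT (by name: the statement is the Claim_ definition above) =====
theorem collect_wildcards_py_spec : Claim_equal_collect_wildcards_py := by
  intro fns sufs _
  show collect_wildcards_py fns sufs = collect_wildcards_py_alt fns sufs
  show (fns.foldl (fun w name => pvFoldA (pvM name) (pvPre name) sufs w)
      (PySem.Dict.empty : PySem.Dict String String)).items = _
  rw [outer_inv]
  have hfilter : (PySem.Set.ofList sufs).filter
      (fun s => !(PySem.Dict.contains (PySem.Dict.empty : PySem.Dict String String) s))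
      = PySem.Set.ofList sufs := by
    simp [PySem.Dict.contains_empty]
  rw [hfilter]
  unfold collect_wildcards_py_alt
  rw [pendingInit_eq]
  rfl
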